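-- pv_equiv track=rewrite | github.com/abeledl/PrompterWebsite | pythonProblem.py | create_pattern
-- ===== SOURCE A (Python) =====
-- def create_pattern(length):
--     pattern = []
--     twoZero = True
--     firstPosition = 0
--     if length % 2 == 0:
--         firstPosition = int(length / 2) - 2
--     else:
--         firstPosition = int((length + 1) / 2) - 2
--         twoZero = False
--     if length == 1:
--         pattern.append(firstPosition)
--     if length == 2:
--         for _ in range(2):
--             pattern.append(firstPosition)
--     if length == 3:
--         for _ in range(3):
--             pattern.append(firstPosition)
--     if length > 3:
--         for _ in range(4):
--             pattern.append(firstPosition)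
--     if length > 4:
--         # Pattern for even numbers
--         if twoZero:
--             for i in range(int(firstPosition) - 1, 0, -1):
--                 pattern.append(i)
--                 pattern.append(i)
--             pattern.append(0)
--             pattern.append(0)
--         else:
--             for i in range(int(firstPosition) -1, 0, -1):
--                 pattern.append(i)
--                 pattern.append(i)
--             pattern.append(0)
--     return pattern
-- ===== SOURCE B (Python) =====
-- def create_pattern(length):
--     # one-pass closed form: value at index i is fp for the first four slots,
--     # then decreases by one every two slots
--     if length % 2 == 0:
--         fp = length // 2 - 2
--     else:
--         fp = (length + 1) // 2 - 2
--     return [fp if i < 4 else fp - 1 - (i - 4) // 2 for i in range(length)]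
-- ===== Notes on version B (the rewrite author's own statement) =====
-- stated objective: simpler
-- what changed: Replaces the length==1/2/3/>3/>4 guard cascade and the descending double-append loop with a single comprehension over range(length) using the closed-form value fp if i<4 else fp-1-(i-4)//2.
import Mathlib
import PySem

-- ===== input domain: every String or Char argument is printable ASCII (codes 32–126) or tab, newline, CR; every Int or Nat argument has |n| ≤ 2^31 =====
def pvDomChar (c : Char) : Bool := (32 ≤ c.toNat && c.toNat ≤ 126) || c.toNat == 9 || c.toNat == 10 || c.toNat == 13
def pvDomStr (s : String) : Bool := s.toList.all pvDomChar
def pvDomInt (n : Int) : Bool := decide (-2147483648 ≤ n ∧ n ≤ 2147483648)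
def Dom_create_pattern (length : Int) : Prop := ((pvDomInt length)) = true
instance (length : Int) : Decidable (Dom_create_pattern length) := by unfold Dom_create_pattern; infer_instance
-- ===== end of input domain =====

-- B replaces A's guard cascade and descending double-append loop with one map over
-- range(length) using a closed-form per-index value (objective: simpler; same cost).

-- ===== PORT A =====
def create_pattern (length : Int) : List Int :=
  let pattern : List Int := []
  -- int(length/2) / int((length+1)/2): truncating division, exact on |length| ≤ 2^31
  let fpTz : Int × Bool :=
    if PySem.Int.mod length 2 = 0 then (PySem.Int.truncdiv length 2 - 2, true)
    else (PySem.Int.truncdiv (length + 1) 2 - 2, false)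
  let firstPosition := fpTz.1
  let twoZero := fpTz.2
  let pattern := if length = 1 then pattern ++ [firstPosition] else pattern
  let pattern := if length = 2 then (List.range 2).foldl (fun acc _ => acc ++ [firstPosition]) pattern else pattern
  let pattern := if length = 3 then (List.range 3).foldl (fun acc _ => acc ++ [firstPosition]) pattern else pattern
  let pattern := if length > 3 then (List.range 4).foldl (fun acc _ => acc ++ [firstPosition]) pattern else pattern
  let pattern := if length > 4 then
      let p := (PySem.List.pyRange (firstPosition - 1) 0 (-1)).foldl (fun acc i => acc ++ [i, i]) pattern
      if twoZero then p ++ [0, 0] else p ++ [(0 : Int)]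
    else pattern
  pattern

-- ===== PORT B =====
def create_pattern_alt (length : Int) : List Int :=
  let fp : Int :=
    if PySem.Int.mod length 2 = 0 then PySem.Int.floordiv length 2 - 2
    else PySem.Int.floordiv (length + 1) 2 - 2
  (PySem.List.pyRange 0 length 1).map
    (fun i => if i < 4 then fp else fp - 1 - PySem.Int.floordiv (i - 4) 2)

-- ===== PRECONDITION & SPEC =====
def Spec_create_pattern (length : Int) (out : List Int) : Prop := out = create_pattern_alt length
instance (length : Int) (out : List Int) : Decidable (Spec_create_pattern length out) := by unfold Spec_create_pattern; infer_instance

-- ===== CLAIM (what is proved, stated in full; the proofs are below) =====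
def Claim_equal_create_pattern : Prop := ∀ (length : Int), Dom_create_pattern length → Spec_create_pattern length (create_pattern length)

-- ===== LEMMAS AND PROOFS =====

-- the closed-form tail of B equals the double-append descent of A, even-length shape
lemma pv_key_even (m : Nat) :
    (List.range (2 * m + 2)).map (fun j => (m : Int) - ((j / 2 : Nat) : Int))
      = ((List.range m).map (fun k : Nat => (m : Int) - (k : Int))).flatMap (fun i => [i, i]) ++ [0, 0] := by
  induction m with
  | zero => decide
  | succ m ih =>
    have h1 : 2 * (m + 1) + 2 = 2 + (2 * m + 2) := by omega
    rw [h1, List.range_add, List.map_append]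
    have h2 : ((List.range (2 * m + 2)).map (2 + ·)).map
        (fun j => ((m + 1 : Nat) : Int) - ((j / 2 : Nat) : Int))
        = (List.range (2 * m + 2)).map (fun j => (m : Int) - ((j / 2 : Nat) : Int)) := by
      rw [List.map_map]
      apply List.map_congr_left
      intro j hj
      simp only [Function.comp_apply]
      omega
    have h3 : (List.range 2).map (fun j => ((m + 1 : Nat) : Int) - ((j / 2 : Nat) : Int))
        = [((m + 1 : Nat) : Int), ((m + 1 : Nat) : Int)] := by
      simp [List.range_succ]
    rw [h2, ih, h3]
    conv_rhs => rw [List.range_succ_eq_map, List.map_cons, List.flatMap_cons, List.map_map]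
    have h4 : List.map ((fun k : Nat => ((m + 1 : Nat) : Int) - (k : Int)) ∘ Nat.succ) (List.range m)
        = List.map (fun k : Nat => (m : Int) - (k : Int)) (List.range m) := by
      apply List.map_congr_left
      intro k hk
      simp only [Function.comp_apply]
      omega
    rw [h4]
    simp

-- odd-length shape
lemma pv_key_odd (m : Nat) :
    (List.range (2 * m + 1)).map (fun j => (m : Int) - ((j / 2 : Nat) : Int))
      = ((List.range m).map (fun k : Nat => (m : Int) - (k : Int))).flatMap (fun i => [i, i]) ++ [0] := by
  induction m with
  | zero => decide
  | succ m ih =>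
    have h1 : 2 * (m + 1) + 1 = 2 + (2 * m + 1) := by omega
    rw [h1, List.range_add, List.map_append]
    have h2 : ((List.range (2 * m + 1)).map (2 + ·)).map
        (fun j => ((m + 1 : Nat) : Int) - ((j / 2 : Nat) : Int))
        = (List.range (2 * m + 1)).map (fun j => (m : Int) - ((j / 2 : Nat) : Int)) := by
      rw [List.map_map]
      apply List.map_congr_left
      intro j hj
      simp only [Function.comp_apply]
      omega
    have h3 : (List.range 2).map (fun j => ((m + 1 : Nat) : Int) - ((j / 2 : Nat) : Int))
        = [((m + 1 : Nat) : Int), ((m + 1 : Nat) : Int)] := by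
      simp [List.range_succ]
    rw [h2, ih, h3]
    conv_rhs => rw [List.range_succ_eq_map, List.map_cons, List.flatMap_cons, List.map_map]
    have h4 : List.map ((fun k : Nat => ((m + 1 : Nat) : Int) - (k : Int)) ∘ Nat.succ) (List.range m)
        = List.map (fun k : Nat => (m : Int) - (k : Int)) (List.range m) := by
      apply List.map_congr_left
      intro k hk
      simp only [Function.comp_apply]
      omega
    rw [h4]
    simp

-- A and B agree on every even length ≥ 6 / odd length ≥ 5; the remaining lengths are finite cases
lemma pv_even_case (m : Nat) : create_pattern (2*(m:Int)+6) = create_pattern_alt (2*(m:Int)+6) := by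
  have hpar : PySem.Int.mod (2*(m:Int)+6) 2 = 0 := by
    rw [PySem.Int.mod_eq_zero_iff_dvd]; omega
  have h1 : (2*(m:Int)+6) ≠ 1 := by omega
  have h2 : (2*(m:Int)+6) ≠ 2 := by omega
  have h3 : (2*(m:Int)+6) ≠ 3 := by omega
  have h4 : (3:Int) < 2*(m:Int)+6 := by omega
  have h5 : (4:Int) < 2*(m:Int)+6 := by omega
  have hfp : PySem.Int.truncdiv (2*(m:Int)+6) 2 - 2 = (m:Int) + 1 := by
    unfold PySem.Int.truncdiv
    rw [Int.tdiv_eq_ediv_of_nonneg (by omega)]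
    omega
  have hfp' : PySem.Int.floordiv (2*(m:Int)+6) 2 - 2 = (m:Int) + 1 := by
    rw [PySem.Int.floordiv_eq_ediv_of_pos (by omega)]
    omega
  simp only [create_pattern, create_pattern_alt, hpar, if_neg h1, if_neg h2, if_neg h3, gt_iff_lt, if_pos h4, if_pos h5, hfp, hfp']
  simp only [if_true]
  have hr4 : List.range 4 = [0, 1, 2, 3] := by decide
  rw [hr4]
  simp only [List.foldl]
  rw [PySem.List.foldl_append_eq_flatMap]
  have hm0 : ((m : Int) + 1 - 1) = (m : Int) := by omega
  rw [hm0, PySem.List.pyRange_neg_one]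
  have hmt : ((m : Int) - 0).toNat = m := by omega
  rw [hmt, PySem.List.pyRange_one]
  have hlt : ((2 * (m : Int) + 6) - 0).toNat = 4 + (2 * m + 2) := by omega
  rw [hlt, List.range_add, List.map_append, List.map_append]
  have hseg1 : List.map (fun i => if i < 4 then (m : Int) + 1 else (m : Int) - PySem.Int.floordiv (i - 4) 2)
      (List.map (fun k : Nat => (0 : Int) + ↑k) (List.range 4)) = [(m : Int) + 1, (m : Int) + 1, (m : Int) + 1, (m : Int) + 1] := by
    rw [hr4]
    norm_num
  have hseg2 : List.map (fun i => if i < 4 then (m : Int) + 1 else (m : Int) - PySem.Int.floordiv (i - 4) 2)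
      (List.map (fun k : Nat => (0 : Int) + ↑k) (List.map (fun x => 4 + x) (List.range (2 * m + 2))))
      = (List.range (2 * m + 2)).map (fun j => (m : Int) - ((j / 2 : Nat) : Int)) := by
    rw [List.map_map, List.map_map]
    apply List.map_congr_left
    intro j hj
    simp only [Function.comp_apply]
    have hc : ¬((0 : Int) + ↑(4 + j) < 4) := by push_cast; omega
    rw [if_neg hc]
    have ha : (0 : Int) + ↑(4 + j) - 4 = (j : Int) := by push_cast; ring
    rw [ha]
    have hb : PySem.Int.floordiv (j : Int) 2 = ((j / 2 : Nat) : Int) := by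
      exact_mod_cast PySem.Int.floordiv_natCast j 2
    rw [hb]
  rw [hseg1, hseg2, pv_key_even]
  simp

lemma pv_odd_case (m : Nat) : create_pattern (2*(m:Int)+5) = create_pattern_alt (2*(m:Int)+5) := by
  have hpar : ¬(PySem.Int.mod (2*(m:Int)+5) 2 = 0) := by
    rw [PySem.Int.mod_eq_zero_iff_dvd]; omega
  have h1 : (2*(m:Int)+5) ≠ 1 := by omega
  have h2 : (2*(m:Int)+5) ≠ 2 := by omega
  have h3 : (2*(m:Int)+5) ≠ 3 := by omega
  have h4 : (3:Int) < 2*(m:Int)+5 := by omega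
  have h5 : (4:Int) < 2*(m:Int)+5 := by omega
  have hfp : PySem.Int.truncdiv (2*(m:Int)+5+1) 2 - 2 = (m:Int) + 1 := by
    unfold PySem.Int.truncdiv
    rw [Int.tdiv_eq_ediv_of_nonneg (by omega)]
    omega
  have hfp' : PySem.Int.floordiv (2*(m:Int)+5+1) 2 - 2 = (m:Int) + 1 := by
    rw [PySem.Int.floordiv_eq_ediv_of_pos (by omega)]
    omega
  simp only [create_pattern, create_pattern_alt, if_neg hpar, if_neg h1, if_neg h2, if_neg h3, gt_iff_lt, if_pos h4, if_pos h5, hfp, hfp', Bool.false_eq_true, if_false]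
  have hr4 : List.range 4 = [0, 1, 2, 3] := by decide
  rw [hr4]
  simp only [List.foldl]
  rw [PySem.List.foldl_append_eq_flatMap]
  have hm0 : ((m : Int) + 1 - 1) = (m : Int) := by omega
  rw [hm0, PySem.List.pyRange_neg_one]
  have hmt : ((m : Int) - 0).toNat = m := by omega
  rw [hmt, PySem.List.pyRange_one]
  have hlt : ((2 * (m : Int) + 5) - 0).toNat = 4 + (2 * m + 1) := by omega
  rw [hlt, List.range_add, List.map_append, List.map_append]
  have hseg1 : List.map (fun i => if i < 4 then (m : Int) + 1 else (m : Int) - PySem.Int.floordiv (i - 4) 2)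
      (List.map (fun k : Nat => (0 : Int) + ↑k) (List.range 4)) = [(m : Int) + 1, (m : Int) + 1, (m : Int) + 1, (m : Int) + 1] := by
    rw [hr4]
    norm_num
  have hseg2 : List.map (fun i => if i < 4 then (m : Int) + 1 else (m : Int) - PySem.Int.floordiv (i - 4) 2)
      (List.map (fun k : Nat => (0 : Int) + ↑k) (List.map (fun x => 4 + x) (List.range (2 * m + 1))))
      = (List.range (2 * m + 1)).map (fun j => (m : Int) - ((j / 2 : Nat) : Int)) := by
    rw [List.map_map, List.map_map]
    apply List.map_congr_left
    intro j hj
    simp only [Function.comp_apply]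
    have hc : ¬((0 : Int) + ↑(4 + j) < 4) := by push_cast; omega
    rw [if_neg hc]
    have ha : (0 : Int) + ↑(4 + j) - 4 = (j : Int) := by push_cast; ring
    rw [ha]
    have hb : PySem.Int.floordiv (j : Int) 2 = ((j / 2 : Nat) : Int) := by
      exact_mod_cast PySem.Int.floordiv_natCast j 2
    rw [hb]
  rw [hseg1, hseg2, pv_key_odd]
  simp

-- ===== VERDICT (by name: the statement is the Claim_ definition above) =====
theorem create_pattern_spec : Claim_equal_create_pattern := by
  intro length _
  unfold Spec_create_pattern
  by_cases h0 : length ≤ 0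
  · have h1 : length ≠ 1 := by omega
    have h2 : length ≠ 2 := by omega
    have h3 : length ≠ 3 := by omega
    have h4 : ¬((3 : Int) < length) := by omega
    have h5 : ¬((4 : Int) < length) := by omega
    have hA : create_pattern length = [] := by
      simp [create_pattern, h1, h2, h3, h4, h5]
    have hB : create_pattern_alt length = [] := by
      simp [create_pattern_alt, PySem.List.pyRange_one_eq_nil h0]
    rw [hA, hB]
  · by_cases e1 : length = 1
    · subst e1; decide
    · by_cases e2 : length = 2
      · subst e2; decide
      · by_cases e3 : length = 3
        · subst e3; decide
        · by_cases e4 : length = 4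
          · subst e4; decide
          · have h5 : 5 ≤ length := by omega
            rcases Int.even_or_odd length with ⟨k, hk⟩ | ⟨k, hk⟩
            · have hm : length = 2 * (((k - 3).toNat : Nat) : Int) + 6 := by omega
              rw [hm]
              exact pv_even_case (k - 3).toNat
            · have hm : length = 2 * (((k - 2).toNat : Nat) : Int) + 5 := by omega
              rw [hm]
              exact pv_odd_case (k - 2).toNat
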